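-- pv_equiv track=rewrite | github.com/abespitalny/CodingPuzzles | HackerRank/Press_A_For_Caps_Lock/solution.py | pressAForCapsLock
-- ===== SOURCE A (Python) =====
-- def pressAForCapsLock(message):
--     s = ""
--     # Caps Lock is initially off
--     caps_lock = False
--     for c in message:
--         # Shift key is pressed if character is uppercase
--         shift = c.isupper()
--         if c == 'A' or c == 'a':
--             # toggle Caps Lock when 'a' is pressed
--             caps_lock = not caps_lock
--         else:
--             # Caps Lock is on
--             if caps_lock:
--                 # if Shift key is pressed then character should be lowercase
--                 if shift:
--                     s += c.lower()
--                 else: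
--                     s += c.upper()
--             else:
--                 s += c
--
--     return s
-- ===== SOURCE B (Python) =====
-- import re
--
-- def pressAForCapsLock(message):
--     parts = re.split('[aA]', message)
--     return ''.join(p if i % 2 == 0 else p.swapcase() for i, p in enumerate(parts))
-- ===== Notes on version B (the rewrite author's own statement) =====
-- stated objective: idiomatic
-- what changed: Replaces the stateful per-character Caps-Lock loop with a regex split on the toggle letters into segments that alternate Caps state, applying str.swapcase() to the odd-indexed segments and joining.
import Mathlib
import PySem

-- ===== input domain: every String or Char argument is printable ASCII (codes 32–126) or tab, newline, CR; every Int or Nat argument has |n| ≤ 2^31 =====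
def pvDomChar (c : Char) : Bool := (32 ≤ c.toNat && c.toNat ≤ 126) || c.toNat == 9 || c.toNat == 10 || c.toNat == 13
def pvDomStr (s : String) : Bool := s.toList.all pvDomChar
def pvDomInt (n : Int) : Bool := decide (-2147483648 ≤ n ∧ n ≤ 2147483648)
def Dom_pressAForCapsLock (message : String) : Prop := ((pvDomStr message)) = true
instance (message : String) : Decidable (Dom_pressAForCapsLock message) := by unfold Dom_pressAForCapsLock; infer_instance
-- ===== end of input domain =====

-- B replaces A's stateful per-character Caps-Lock loop with re.split on the toggle
-- characters followed by swapcase on the odd-indexed segments (objective: idiomatic).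

-- ===== PORT A =====
-- the body of A's for-loop: state is (output so far, caps_lock)
def pvStepA (st : List Char × Bool) (c : Char) : List Char × Bool :=
  let shift := PySem.Chars.isupper c
  if c = 'A' ∨ c = 'a' then
    (st.1, !st.2)
  else
    if st.2 then
      if shift then (st.1 ++ [PySem.Chars.lowerChar c], st.2)
      else (st.1 ++ [PySem.Chars.upperChar c], st.2)
    else (st.1 ++ [c], st.2)

-- literal port of A: fold the loop body over the characters
def pressAForCapsLock (message : String) : String :=
  let r := message.toList.foldl pvStepA ([], false)
  String.ofList r.1

-- ===== PORT B =====
-- str.swapcase on one ASCII character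
def pvSwapChar (c : Char) : Char :=
  if PySem.Chars.isupper c then PySem.Chars.lowerChar c
  else if PySem.Chars.islower c then PySem.Chars.upperChar c
  else c

-- hand port of re.split('[aA]', ·): split the character list at every 'a'/'A'
def pvSplitAa : List Char → List (List Char)
  | [] => [[]]
  | c :: cs =>
    if c = 'a' ∨ c = 'A' then [] :: pvSplitAa cs
    else
      match pvSplitAa cs with
      | [] => [[c]]        -- unreachable: pvSplitAa never returns []
      | p :: ps => (c :: p) :: ps

def pressAForCapsLock_alt (message : String) : String :=
  String.ofList
    (((PySem.List.enumerate (pvSplitAa message.toList)).map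
        (fun pi => if PySem.Int.mod pi.1 2 = 0 then pi.2 else pi.2.map pvSwapChar)).flatten)

-- ===== PRECONDITION & SPEC =====
def Spec_pressAForCapsLock (message : String) (out : String) : Prop := out = pressAForCapsLock_alt message
instance (message : String) (out : String) : Decidable (Spec_pressAForCapsLock message out) := by unfold Spec_pressAForCapsLock; infer_instance

-- ===== CLAIM (what is proved, stated in full; the proofs are below) =====
def Claim_equal_pressAForCapsLock : Prop := ∀ (message : String), Dom_pressAForCapsLock message → Spec_pressAForCapsLock message (pressAForCapsLock message)

-- ===== LEMMAS AND PROOFS =====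

-- alternating renderer: proof-side common denominator of both ports
def pvAlt : List (List Char) → Bool → List Char
  | [], _ => []
  | p :: ps, b => (if b then p.map pvSwapChar else p) ++ pvAlt ps (!b)

theorem pvSplitAa_ne_nil (cs : List Char) : pvSplitAa cs ≠ [] := by
  cases cs with
  | nil => simp [pvSplitAa]
  | cons c cs =>
    simp only [pvSplitAa]
    split
    · simp
    · rcases h : pvSplitAa cs with _ | ⟨p, ps⟩ <;> simp

-- A's caps-on branch is exactly swapcase (for every character)
theorem pvCapsOn_eq_swap (c : Char) :
    (if PySem.Chars.isupper c then PySem.Chars.lowerChar c else PySem.Chars.upperChar c)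
      = pvSwapChar c := by
  unfold pvSwapChar
  split_ifs with h1 h2
  · rfl
  · rfl
  · simp [PySem.Chars.upperChar, h2]

-- B's enumerate-and-join equals the alternating renderer
theorem pvB_eq_alt (ps : List (List Char)) (n : Nat) :
    ((PySem.List.enumerate ps (n : Int)).map
       (fun pi => if PySem.Int.mod pi.1 2 = 0 then pi.2 else pi.2.map pvSwapChar)).flatten
      = pvAlt ps (n % 2 ≠ 0) := by
  induction ps generalizing n with
  | nil => simp [PySem.List.enumerate_nil, pvAlt]
  | cons p ps ih =>
    have hcast : ((n : Int) + 1) = ((n + 1 : Nat) : Int) := by push_cast; ring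
    rw [PySem.List.enumerate_cons, List.map_cons, List.flatten_cons, hcast, ih (n + 1)]
    rw [show PySem.Int.mod (n : Int) 2 = (n : Int) % 2 from
          PySem.Int.mod_eq_emod_of_pos (by norm_num)]
    by_cases h : n % 2 = 0
    · have hi : ((n : Int)) % 2 = 0 := by omega
      have h2 : (n + 1) % 2 = 1 := by omega
      simp [pvAlt, hi, h, h2]
    · have hi : ¬ ((n : Int) % 2 = 0) := by omega
      have h1 : n % 2 = 1 := by omega
      have h2 : (n + 1) % 2 = 0 := by omega
      simp [pvAlt, hi, h1, h2]

-- A's loop invariant: from state (s, caps) the loop appends pvAlt (split rest) caps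
theorem pvA_loop (cs : List Char) (s : List Char) (caps : Bool) :
    (cs.foldl pvStepA (s, caps)).1 = s ++ pvAlt (pvSplitAa cs) caps := by
  induction cs generalizing s caps with
  | nil => cases caps <;> simp [pvSplitAa, pvAlt]
  | cons c cs ih =>
    rw [List.foldl_cons]
    by_cases hc : c = 'A' ∨ c = 'a'
    · have hstep : pvStepA (s, caps) c = (s, !caps) := by simp [pvStepA, hc]
      have hsplit : pvSplitAa (c :: cs) = [] :: pvSplitAa cs := by
        simp [pvSplitAa, hc.symm]
      rw [hstep, ih, hsplit]
      cases caps <;> simp [pvAlt]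
    · have hc2 : ¬ (c = 'a' ∨ c = 'A') := fun h => hc h.symm
      rcases h : pvSplitAa cs with _ | ⟨p, ps⟩
      · exact absurd h (pvSplitAa_ne_nil cs)
      · have hsplit : pvSplitAa (c :: cs) = (c :: p) :: ps := by
          simp only [pvSplitAa, if_neg hc2, h]
        have hstep : pvStepA (s, caps) c
            = (s ++ [if caps then pvSwapChar c else c], caps) := by
          cases caps with
          | false => simp [pvStepA, hc]
          | true =>
            simp only [pvStepA, if_neg hc, if_true]
            rw [← pvCapsOn_eq_swap c]
            split_ifs <;> rfl
        rw [hstep, ih, h, hsplit]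
        cases caps <;> simp [pvAlt]

-- ===== VERDICT (by name: the statement is the Claim_ definition above) =====
theorem pressAForCapsLock_spec : Claim_equal_pressAForCapsLock := by
  intro message _
  unfold Spec_pressAForCapsLock pressAForCapsLock pressAForCapsLock_alt
  simp only [pvA_loop]
  have := pvB_eq_alt (pvSplitAa message.toList) 0
  simp only [Nat.cast_zero] at this
  rw [this]
  simp
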